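-- pv_equiv track=rewrite | github.com/rishav98sin-max/applysmart-ai | agents/pdf_editor.py | _match_role_order
-- ===== SOURCE A (Python) =====
-- from typing import Any, Dict, List, Optional
--
-- def _match_role_order(
--     header: str,
--     bullet_edits: Dict[str, List[int]],
-- ) -> Optional[List[int]]:
--     """Tolerant match: exact → startswith → substring."""
--     h = header.strip().lower()
--     # Exact / case-insensitive
--     for k, v in bullet_edits.items():
--         if k.strip().lower() == h:
--             return v
--     # Startswith either direction
--     for k, v in bullet_edits.items():
--         kl = k.strip().lower()
--         if h.startswith(kl) or kl.startswith(h):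
--             return v
--     # Substring
--     for k, v in bullet_edits.items():
--         kl = k.strip().lower()
--         if kl and kl in h:
--             return v
--     return None
-- ===== SOURCE B (Python) =====
-- def _match_role_order(header, bullet_edits):
--     """Single pass: rank each key (0 exact, 1 prefix either way, 2 substring),
--     keep the first key with the lowest rank."""
--     h = header.strip().lower()
--     best_priority = 3
--     best_value = None
--     for k, v in bullet_edits.items():
--         kl = k.strip().lower()
--         if kl == h:
--             p = 0
--         elif h.startswith(kl) or kl.startswith(h):
--             p = 1
--         elif kl and kl in h:
--             p = 2
--         else:
--             continue
--         if p < best_priority: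
--             best_priority = p
--             best_value = v
--             if p == 0:
--                 break
--     return best_value
-- ===== Notes on version B (the rewrite author's own statement) =====
-- stated objective: alternative
-- what changed: Replaces A's three sequential scans (exact, prefix, substring) by a single pass that ranks each key with a priority ladder, keeps the first key of the lowest rank, breaks early on an exact match, and normalises each key once instead of up to three times.
import Mathlib
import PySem

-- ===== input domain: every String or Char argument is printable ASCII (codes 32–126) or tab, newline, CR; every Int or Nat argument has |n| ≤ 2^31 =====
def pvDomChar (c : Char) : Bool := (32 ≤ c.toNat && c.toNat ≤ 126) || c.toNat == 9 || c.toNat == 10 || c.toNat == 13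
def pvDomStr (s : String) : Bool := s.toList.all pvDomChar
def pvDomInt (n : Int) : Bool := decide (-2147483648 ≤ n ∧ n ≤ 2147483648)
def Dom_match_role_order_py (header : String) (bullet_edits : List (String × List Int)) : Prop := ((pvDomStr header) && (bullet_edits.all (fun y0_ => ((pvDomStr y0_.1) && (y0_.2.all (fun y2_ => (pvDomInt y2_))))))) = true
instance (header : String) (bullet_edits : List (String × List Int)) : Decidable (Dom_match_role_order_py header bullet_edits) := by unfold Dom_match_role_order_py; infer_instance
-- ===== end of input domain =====

-- B replaces A's three sequential scans by one pass that ranks each key (0 exact,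
-- 1 prefix either way, 2 substring) and keeps the first key of the lowest rank
-- (objective: alternative decomposition, not claimed faster).

-- ===== PORT A =====
-- First scan: exact / case-insensitive match.
def pvScanExact (h : String) : List (String × List Int) → Option (List Int)
  | [] => none
  | (k, v) :: rest =>
      if PySem.Str.lower (PySem.Str.strip k) = h then some v else pvScanExact h rest

-- Second scan: startswith in either direction.
def pvScanPrefix (h : String) : List (String × List Int) → Option (List Int)
  | [] => none
  | (k, v) :: rest =>
      if PySem.Str.startswith h (PySem.Str.lower (PySem.Str.strip k)) ||
         PySem.Str.startswith (PySem.Str.lower (PySem.Str.strip k)) h then some v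
      else pvScanPrefix h rest

-- Third scan: nonempty substring.
def pvScanSub (h : String) : List (String × List Int) → Option (List Int)
  | [] => none
  | (k, v) :: rest =>
      if PySem.Str.lower (PySem.Str.strip k) ≠ "" ∧
         PySem.Str.isIn (PySem.Str.lower (PySem.Str.strip k)) h then some v
      else pvScanSub h rest

def match_role_order_py (header : String) (bullet_edits : List (String × List Int)) : Option (List Int) :=
  let h := PySem.Str.lower (PySem.Str.strip header)
  match pvScanExact h bullet_edits with
  | some v => some v
  | none =>
    match pvScanPrefix h bullet_edits with
    | some v => some v
    | none =>
      match pvScanSub h bullet_edits with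
      | some v => some v
      | none => none

-- ===== PORT B =====
-- Priority of one normalised key against the normalised header (3 = no match).
def pvPriority (h kl : String) : Nat :=
  if kl = h then 0
  else if PySem.Str.startswith h kl || PySem.Str.startswith kl h then 1
  else if kl ≠ "" ∧ PySem.Str.isIn kl h then 2
  else 3

-- One fold step: keep the incoming key only if its priority is strictly better.
def pvStep (h : String) (st : Nat × Option (List Int)) (kv : String × List Int) : Nat × Option (List Int) :=
  if pvPriority h (PySem.Str.lower (PySem.Str.strip kv.1)) < st.1 then
    (pvPriority h (PySem.Str.lower (PySem.Str.strip kv.1)), some kv.2)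
  else st

-- The loop: fold with early exit once an exact match (priority 0) is held ('break').
def pvLoop (h : String) : Nat × Option (List Int) → List (String × List Int) → Nat × Option (List Int)
  | st, [] => st
  | st, kv :: rest =>
      let st' := pvStep h st kv
      if st'.1 = 0 then st' else pvLoop h st' rest

def match_role_order_py_alt (header : String) (bullet_edits : List (String × List Int)) : Option (List Int) :=
  let h := PySem.Str.lower (PySem.Str.strip header)
  (pvLoop h (3, none) bullet_edits).2

-- ===== PRECONDITION & SPEC =====
def Spec_match_role_order_py (header : String) (bullet_edits : List (String × List Int)) (out : Option (List Int)) : Prop := out = match_role_order_py_alt header bullet_edits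
instance (header : String) (bullet_edits : List (String × List Int)) (out : Option (List Int)) : Decidable (Spec_match_role_order_py header bullet_edits out) := by unfold Spec_match_role_order_py; infer_instance

-- ===== CLAIM (what is proved, stated in full; the proofs are below) =====
def Claim_equal_match_role_order_py : Prop := ∀ (header : String) (bullet_edits : List (String × List Int)), Dom_match_role_order_py header bullet_edits → Spec_match_role_order_py header bullet_edits (match_role_order_py header bullet_edits)

-- ===== LEMMAS AND PROOFS =====

-- Looping from priority 1 = the exact scan of the remaining list.
theorem pvFold_one (h : String) (l : List (String × List Int)) (v0 : Option (List Int)) :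
    pvLoop h (1, v0) l =
      match pvScanExact h l with
      | some x => (0, some x)
      | none => (1, v0) := by
  induction l with
  | nil => rfl
  | cons kv rest ih =>
      obtain ⟨k, v⟩ := kv
      by_cases hk : PySem.Str.lower (PySem.Str.strip k) = h
      · simp [pvLoop, pvStep, pvScanExact, hk, pvPriority]
      · have hge : ¬ pvPriority h (PySem.Str.lower (PySem.Str.strip k)) < 1 := by
          simp only [pvPriority, if_neg hk]; split_ifs <;> omega
        simp only [pvLoop, pvStep, pvScanExact, if_neg hge, if_neg hk]
        exact ih

-- Looping from priority 2 = exact scan, then prefix scan, of the remaining list.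
theorem pvFold_two (h : String) (l : List (String × List Int)) (v0 : Option (List Int)) :
    pvLoop h (2, v0) l =
      match pvScanExact h l with
      | some x => (0, some x)
      | none =>
        match pvScanPrefix h l with
        | some x => (1, some x)
        | none => (2, v0) := by
  induction l with
  | nil => rfl
  | cons kv rest ih =>
      obtain ⟨k, v⟩ := kv
      by_cases hk : PySem.Str.lower (PySem.Str.strip k) = h
      · simp [pvLoop, pvStep, pvScanExact, hk, pvPriority]
      · by_cases hp : (PySem.Str.startswith h (PySem.Str.lower (PySem.Str.strip k)) ||
            PySem.Str.startswith (PySem.Str.lower (PySem.Str.strip k)) h) = true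
        · have h1 : pvPriority h (PySem.Str.lower (PySem.Str.strip k)) = 1 := by
            simp only [pvPriority, if_neg hk, if_pos hp]
          simp only [pvLoop, pvStep, pvScanExact, pvScanPrefix, h1,
            if_neg hk, if_pos hp, show (1 : Nat) < 2 by omega, if_true, pvFold_one]
          simp
        · have hge : ¬ pvPriority h (PySem.Str.lower (PySem.Str.strip k)) < 2 := by
            simp only [pvPriority, if_neg hk, if_neg hp]; split_ifs <;> omega
          simp only [pvLoop, pvStep, pvScanExact, pvScanPrefix,
            if_neg hge, if_neg hk, if_neg hp]
          exact ih

-- Looping from priority 3 (the initial state) = the three scans in order.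
theorem pvFold_three (h : String) (l : List (String × List Int)) (v0 : Option (List Int)) :
    pvLoop h (3, v0) l =
      match pvScanExact h l with
      | some x => (0, some x)
      | none =>
        match pvScanPrefix h l with
        | some x => (1, some x)
        | none =>
          match pvScanSub h l with
          | some x => (2, some x)
          | none => (3, v0) := by
  induction l with
  | nil => rfl
  | cons kv rest ih =>
      obtain ⟨k, v⟩ := kv
      by_cases hk : PySem.Str.lower (PySem.Str.strip k) = h
      · simp [pvLoop, pvStep, pvScanExact, hk, pvPriority]
      · by_cases hp : (PySem.Str.startswith h (PySem.Str.lower (PySem.Str.strip k)) ||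
            PySem.Str.startswith (PySem.Str.lower (PySem.Str.strip k)) h) = true
        · have h1 : pvPriority h (PySem.Str.lower (PySem.Str.strip k)) = 1 := by
            simp only [pvPriority, if_neg hk, if_pos hp]
          simp only [pvLoop, pvStep, pvScanExact, pvScanPrefix, h1,
            if_neg hk, if_pos hp, show (1 : Nat) < 3 by omega, if_true, pvFold_one]
          simp
        · by_cases hs : PySem.Str.lower (PySem.Str.strip k) ≠ "" ∧
              PySem.Str.isIn (PySem.Str.lower (PySem.Str.strip k)) h
          · have h2 : pvPriority h (PySem.Str.lower (PySem.Str.strip k)) = 2 := by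
              simp only [pvPriority, if_neg hk, if_neg hp, if_pos hs]
            simp only [pvLoop, pvStep, pvScanExact, pvScanPrefix, pvScanSub, h2,
              if_neg hk, if_neg hp, if_pos hs, show (2 : Nat) < 3 by omega, if_true]
            rw [pvFold_two]
            simp
          · have hge : ¬ pvPriority h (PySem.Str.lower (PySem.Str.strip k)) < 3 := by
              simp only [pvPriority, if_neg hk, if_neg hp, if_neg hs]; omega
            simp only [pvLoop, pvStep, pvScanExact, pvScanPrefix, pvScanSub,
              if_neg hge, if_neg hk, if_neg hp, if_neg hs]
            exact ih

-- A's three scans, as one expression, equal B's single ranking fold.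
theorem pvMain (h : String) (l : List (String × List Int)) :
    (match pvScanExact h l with
     | some v => some v
     | none =>
       match pvScanPrefix h l with
       | some v => some v
       | none =>
         match pvScanSub h l with
         | some v => some v
         | none => (none : Option (List Int))) =
    (pvLoop h (3, none) l).2 := by
  rw [pvFold_three]
  cases pvScanExact h l with
  | some x => rfl
  | none =>
      cases pvScanPrefix h l with
      | some x => rfl
      | none =>
          cases pvScanSub h l with
          | some x => rfl
          | none => rfl

-- ===== VERDICT (by name: the statement is the Claim_ definition above) =====
theorem match_role_order_py_spec : Claim_equal_match_role_order_py := by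
  intro header bullet_edits _
  exact pvMain (PySem.Str.lower (PySem.Str.strip header)) bullet_edits
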